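-- pv_equiv track=rewrite | github.com/sum1tbarua/RAG-Based-Housing-Law-QA-System | rag/evaluation.py | page_overlap
-- ===== SOURCE A (Python) =====
-- from typing import List, Dict, Any, Tuple
--
-- def page_overlap(retrieved_pages: List[int], gold_pages: List[int]) -> bool:
--     """
--     Allow near-hit retrieval within +/- 1 page because legal content
--     often spans page boundaries.
--     """
--     if not gold_pages:
--         return False
--
--     for retrieved_page in retrieved_pages:
--         for gold_page in gold_pages:
--             if abs(retrieved_page - gold_page) <= 1:
--                 return True
--     return False
-- ===== SOURCE B (Python) =====
-- def page_overlap(retrieved_pages, gold_pages):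
--     r = sorted(retrieved_pages)
--     g = sorted(gold_pages)
--     i = j = 0
--     while i < len(r) and j < len(g):
--         if abs(r[i] - g[j]) <= 1:
--             return True
--         if r[i] < g[j]:
--             i += 1
--         else:
--             j += 1
--     return False
-- ===== Notes on version B (the rewrite author's own statement) =====
-- stated objective: alternative
-- what changed: Replaced the nested scan over all retrieved x gold pairs by sorting both lists and running a single two-pointer merge pass that advances the pointer at the smaller value.
import Mathlib
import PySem

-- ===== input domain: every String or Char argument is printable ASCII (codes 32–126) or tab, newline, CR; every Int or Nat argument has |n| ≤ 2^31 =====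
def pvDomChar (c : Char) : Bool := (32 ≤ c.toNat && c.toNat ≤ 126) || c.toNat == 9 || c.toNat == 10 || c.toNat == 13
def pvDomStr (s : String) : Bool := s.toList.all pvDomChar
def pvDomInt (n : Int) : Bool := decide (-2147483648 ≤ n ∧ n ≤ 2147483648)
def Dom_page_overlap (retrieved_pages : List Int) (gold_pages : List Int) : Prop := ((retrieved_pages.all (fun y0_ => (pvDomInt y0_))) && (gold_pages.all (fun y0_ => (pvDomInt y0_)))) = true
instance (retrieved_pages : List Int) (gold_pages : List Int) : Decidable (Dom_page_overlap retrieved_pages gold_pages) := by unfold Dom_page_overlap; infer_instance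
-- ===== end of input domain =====

-- B replaces A's nested scan over every (retrieved, gold) pair by sorting both lists
-- and a single two-pointer merge pass (alternative algorithm; no speed claim).


-- ===== PORT A =====
-- literal port: early-return on empty gold, then the nested for-loops with early return True
def page_overlap (retrieved_pages : List Int) (gold_pages : List Int) : Bool :=
  if gold_pages = [] then false
  else retrieved_pages.any (fun retrieved_page =>
    gold_pages.any (fun gold_page => decide (|retrieved_page - gold_page| ≤ 1)))

-- ===== PORT B =====
-- the two-pointer merge pass of Source B, as structural recursion on the two sorted lists
def pvTwoPtr : List Int → List Int → Bool
  | r :: rs, g :: gs =>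
    if |r - g| ≤ 1 then true
    else if r < g then pvTwoPtr rs (g :: gs)
    else pvTwoPtr (r :: rs) gs
  | _, _ => false
  termination_by a b => a.length + b.length

def page_overlap_alt (retrieved_pages : List Int) (gold_pages : List Int) : Bool :=
  pvTwoPtr (PySem.List.sorted retrieved_pages (fun x => x) false)
           (PySem.List.sorted gold_pages (fun x => x) false)

-- ===== PRECONDITION & SPEC =====
def Spec_page_overlap (retrieved_pages : List Int) (gold_pages : List Int) (out : Bool) : Prop := out = page_overlap_alt retrieved_pages gold_pages
instance (retrieved_pages : List Int) (gold_pages : List Int) (out : Bool) : Decidable (Spec_page_overlap retrieved_pages gold_pages out) := by unfold Spec_page_overlap; infer_instance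

-- ===== CLAIM (what is proved, stated in full; the proofs are below) =====
def Claim_equal_page_overlap : Prop := ∀ (retrieved_pages : List Int) (gold_pages : List Int), Dom_page_overlap retrieved_pages gold_pages → Spec_page_overlap retrieved_pages gold_pages (page_overlap retrieved_pages gold_pages)

-- ===== LEMMAS AND PROOFS =====

-- on ascending lists, the two-pointer pass finds a pair at distance ≤ 1 iff one exists
theorem pvTwoPtr_iff (rs gs : List Int)
    (hr : rs.Pairwise (· ≤ ·)) (hg : gs.Pairwise (· ≤ ·)) :
    pvTwoPtr rs gs = true ↔ ∃ r ∈ rs, ∃ g ∈ gs, |r - g| ≤ 1 := by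
  induction rs, gs using pvTwoPtr.induct with
  | case1 r rs g gs hnear =>
    simp only [pvTwoPtr, if_pos hnear]
    exact iff_of_true trivial ⟨r, by simp, g, by simp, hnear⟩
  | case2 r rs g gs hnear hlt ih =>
    rw [pvTwoPtr, if_neg hnear, if_pos hlt,
      ih (List.Pairwise.sublist (List.sublist_cons_self r rs) hr) hg]
    constructor
    · rintro ⟨r', hr', g', hg', h⟩
      exact ⟨r', List.mem_cons_of_mem _ hr', g', hg', h⟩
    · rintro ⟨r', hr', g', hg', h⟩
      rcases List.mem_cons.mp hr' with rfl | hr'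
      · exfalso
        have hgg : g ≤ g' := by
          rcases List.mem_cons.mp hg' with rfl | hg'
          · exact le_refl _
          · exact (List.pairwise_cons.mp hg).1 _ hg'
        rw [abs_le] at h
        exact hnear (abs_le.mpr (by omega))
      · exact ⟨r', hr', g', hg', h⟩
  | case3 r rs g gs hnear hlt ih =>
    rw [pvTwoPtr, if_neg hnear, if_neg hlt,
      ih hr (List.Pairwise.sublist (List.sublist_cons_self g gs) hg)]
    constructor
    · rintro ⟨r', hr', g', hg', h⟩
      exact ⟨r', hr', g', List.mem_cons_of_mem _ hg', h⟩
    · rintro ⟨r', hr', g', hg', h⟩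
      rcases List.mem_cons.mp hg' with rfl | hg'
      · exfalso
        have hrr : r ≤ r' := by
          rcases List.mem_cons.mp hr' with rfl | hr'
          · exact le_refl _
          · exact (List.pairwise_cons.mp hr).1 _ hr'
        rw [abs_le] at h
        rw [not_lt] at hlt
        exact hnear (abs_le.mpr (by omega))
      · exact ⟨r', hr', g', hg', h⟩
  | case4 rs gs hne =>
    rw [pvTwoPtr.eq_def]
    match rs, gs with
    | [], gs => simp
    | r :: rs, [] => simp
    | r :: rs, g :: gs => exact (hne r rs g gs rfl rfl).elim

theorem pvTwoPtr_nil (rs : List Int) : pvTwoPtr rs [] = false := by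
  rw [pvTwoPtr.eq_def]
  cases rs <;> rfl

theorem page_overlap_eq_alt (R G : List Int) :
    page_overlap R G = page_overlap_alt R G := by
  have hiff := pvTwoPtr_iff _ _
    (PySem.List.sorted_pairwise R (fun x => x))
    (PySem.List.sorted_pairwise G (fun x => x))
  simp only [PySem.List.mem_sorted] at hiff
  unfold page_overlap page_overlap_alt
  by_cases hG : G = []
  · rw [if_pos hG, hG, (PySem.List.sorted_eq_nil_iff ([] : List Int) (fun x => x) false).mpr rfl,
      pvTwoPtr_nil]
  · rw [if_neg hG, Bool.eq_iff_iff, hiff]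
    simp only [List.any_eq_true, decide_eq_true_eq]

-- ===== VERDICT (by name: the statement is the Claim_ definition above) =====
theorem page_overlap_spec : Claim_equal_page_overlap := by
  intro R G _
  exact page_overlap_eq_alt R G
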